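-- pv_equiv track=rewrite | github.com/Judewakim/s3-misconfig | lambda/modules/statistics_calculator.py | calculate_severity_counts
-- ===== SOURCE A (Python) =====
-- def calculate_severity_counts(events):
--     critical_rules = ['s3-bucket-public-read-prohibited', 's3-bucket-public-write-prohibited', 's3-bucket-block-public-acl-enabled']
--     high_rules = ['s3-bucket-server-side-encryption-enabled', 's3-bucket-versioning-enabled']
--     medium_rules = ['s3-bucket-logging-enabled', 's3-bucket-ssl-requests-only']
--     low_rules = ['s3-bucket-object-lock-enabled', 's3-bucket-replication-enabled']
--
--     return {
--         'critical': len([e for e in events if e['configRuleName'] in critical_rules and e['complianceType'] == 'NON_COMPLIANT']),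
--         'high': len([e for e in events if e['configRuleName'] in high_rules and e['complianceType'] == 'NON_COMPLIANT']),
--         'medium': len([e for e in events if e['configRuleName'] in medium_rules and e['complianceType'] == 'NON_COMPLIANT']),
--         'low': len([e for e in events if e['configRuleName'] in low_rules and e['complianceType'] == 'NON_COMPLIANT'])
--     }
-- ===== SOURCE B (Python) =====
-- _SEVERITY_BY_RULE = {
--     's3-bucket-public-read-prohibited': 'critical',
--     's3-bucket-public-write-prohibited': 'critical',
--     's3-bucket-block-public-acl-enabled': 'critical',
--     's3-bucket-server-side-encryption-enabled': 'high',
--     's3-bucket-versioning-enabled': 'high',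
--     's3-bucket-logging-enabled': 'medium',
--     's3-bucket-ssl-requests-only': 'medium',
--     's3-bucket-object-lock-enabled': 'low',
--     's3-bucket-replication-enabled': 'low',
-- }
--
-- def calculate_severity_counts(events):
--     counts = {'critical': 0, 'high': 0, 'medium': 0, 'low': 0}
--     for e in events:
--         sev = _SEVERITY_BY_RULE.get(e['configRuleName'])
--         if sev is not None and e['complianceType'] == 'NON_COMPLIANT':
--             counts[sev] += 1
--     return counts
-- ===== Notes on version B (the rewrite author's own statement) =====
-- stated objective: simpler
-- what changed: Replaces A's four separate filtered scans of the event list (one per severity bucket) with a single pass that looks each event's rule up in a precomputed rule-to-severity dict and increments one counter dict.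
import Mathlib
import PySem

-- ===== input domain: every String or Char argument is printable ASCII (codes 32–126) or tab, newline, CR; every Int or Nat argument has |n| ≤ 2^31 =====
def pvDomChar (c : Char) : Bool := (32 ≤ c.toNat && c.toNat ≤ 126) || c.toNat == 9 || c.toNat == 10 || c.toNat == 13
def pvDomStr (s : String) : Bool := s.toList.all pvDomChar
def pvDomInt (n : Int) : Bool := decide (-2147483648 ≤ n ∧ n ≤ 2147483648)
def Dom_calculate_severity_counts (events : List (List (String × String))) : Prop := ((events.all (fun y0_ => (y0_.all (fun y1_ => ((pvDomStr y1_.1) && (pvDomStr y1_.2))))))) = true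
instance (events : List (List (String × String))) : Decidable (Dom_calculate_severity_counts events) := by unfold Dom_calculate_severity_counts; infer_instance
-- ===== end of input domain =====

-- B replaces A's four filtered scans over the events by one fold that looks each event's
-- rule up in a rule→severity dict and increments one counter dict (objective: simpler).


-- ===== PORT A =====
def critical_rules : List String := ["s3-bucket-public-read-prohibited", "s3-bucket-public-write-prohibited", "s3-bucket-block-public-acl-enabled"]
def high_rules : List String := ["s3-bucket-server-side-encryption-enabled", "s3-bucket-versioning-enabled"]
def medium_rules : List String := ["s3-bucket-logging-enabled", "s3-bucket-ssl-requests-only"]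
def low_rules : List String := ["s3-bucket-object-lock-enabled", "s3-bucket-replication-enabled"]

-- len([e for e in events if e['configRuleName'] in rules and e['complianceType'] == 'NON_COMPLIANT'])
-- (on Pre_ the two key lookups succeed, so the getD "" default is never the decisive value)
def sevCount (rules : List String) (events : List (List (String × String))) : Int :=
  ((events.filter (fun e =>
      decide (((PySem.Dict.mk e).get? "configRuleName").getD "" ∈ rules) &&
      decide (((PySem.Dict.mk e).get? "complianceType").getD "" = "NON_COMPLIANT"))).length : Int)

def calculate_severity_counts (events : List (List (String × String))) : List (String × Int) :=
  [("critical", sevCount critical_rules events),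
   ("high", sevCount high_rules events),
   ("medium", sevCount medium_rules events),
   ("low", sevCount low_rules events)]

-- ===== PORT B =====
def severity_by_rule : PySem.Dict String String := PySem.Dict.mk
  [("s3-bucket-public-read-prohibited", "critical"),
   ("s3-bucket-public-write-prohibited", "critical"),
   ("s3-bucket-block-public-acl-enabled", "critical"),
   ("s3-bucket-server-side-encryption-enabled", "high"),
   ("s3-bucket-versioning-enabled", "high"),
   ("s3-bucket-logging-enabled", "medium"),
   ("s3-bucket-ssl-requests-only", "medium"),
   ("s3-bucket-object-lock-enabled", "low"),
   ("s3-bucket-replication-enabled", "low")]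

-- loop body: sev = _SEVERITY_BY_RULE.get(e['configRuleName']); if sev is not None and … : counts[sev] += 1
def bStep (counts : PySem.Dict String Int) (e : List (String × String)) : PySem.Dict String Int :=
  match severity_by_rule.get? (((PySem.Dict.mk e).get? "configRuleName").getD "") with
  | some sev =>
      if ((PySem.Dict.mk e).get? "complianceType").getD "" = "NON_COMPLIANT" then
        counts.modify sev 0 (· + 1)
      else counts
  | none => counts

def calculate_severity_counts_alt (events : List (List (String × String))) : List (String × Int) :=
  (events.foldl bStep (PySem.Dict.mk [("critical", 0), ("high", 0), ("medium", 0), ("low", 0)])).items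

-- ===== PRECONDITION & SPEC =====
-- Pre_ excludes exactly the inputs where Python A raises KeyError: an event without a
-- 'configRuleName' key, or an event whose rule is one of the monitored rules but which
-- has no 'complianceType' key.
def Pre_calculate_severity_counts (events : List (List (String × String))) : Prop :=
  ∀ e ∈ events,
    ((PySem.Dict.mk e).get? "configRuleName").isSome = true ∧
    ((((PySem.Dict.mk e).get? "configRuleName").getD "" ∈
        (["s3-bucket-public-read-prohibited", "s3-bucket-public-write-prohibited",
          "s3-bucket-block-public-acl-enabled", "s3-bucket-server-side-encryption-enabled",
          "s3-bucket-versioning-enabled", "s3-bucket-logging-enabled",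
          "s3-bucket-ssl-requests-only", "s3-bucket-object-lock-enabled",
          "s3-bucket-replication-enabled"] : List String)) →
      ((PySem.Dict.mk e).get? "complianceType").isSome = true)
instance (events : List (List (String × String))) : Decidable (Pre_calculate_severity_counts events) := by unfold Pre_calculate_severity_counts; infer_instance

def pvWitness_calculate_severity_counts : (List (List (String × String))) :=
  [[("configRuleName", "s3-bucket-logging-enabled"), ("complianceType", "NON_COMPLIANT")],
   [("configRuleName", "other-rule")]]

def Spec_calculate_severity_counts (events : List (List (String × String))) (out : List (String × Int)) : Prop := out = calculate_severity_counts_alt events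
instance (events : List (List (String × String))) (out : List (String × Int)) : Decidable (Spec_calculate_severity_counts events out) := by unfold Spec_calculate_severity_counts; infer_instance

-- ===== CLAIM (what is proved, stated in full; the proofs are below) =====
def Claim_equal_calculate_severity_counts : Prop := ∀ (events : List (List (String × String))), Dom_calculate_severity_counts events → Pre_calculate_severity_counts events → Spec_calculate_severity_counts events (calculate_severity_counts events)

-- ===== LEMMAS AND PROOFS =====

-- the rule→severity dict as a nested-if lookup table
lemma sev_get? (r : String) : severity_by_rule.get? r =
    if r = "s3-bucket-public-read-prohibited" then some "critical"
    else if r = "s3-bucket-public-write-prohibited" then some "critical"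
    else if r = "s3-bucket-block-public-acl-enabled" then some "critical"
    else if r = "s3-bucket-server-side-encryption-enabled" then some "high"
    else if r = "s3-bucket-versioning-enabled" then some "high"
    else if r = "s3-bucket-logging-enabled" then some "medium"
    else if r = "s3-bucket-ssl-requests-only" then some "medium"
    else if r = "s3-bucket-object-lock-enabled" then some "low"
    else if r = "s3-bucket-replication-enabled" then some "low"
    else none := by
  simp only [severity_by_rule, PySem.Dict.get?_mk_cons, beq_iff_eq,
    show ∀ x, (PySem.Dict.mk ([] : List (String × String))).get? x = none from fun _ => rfl,
    show ("s3-bucket-public-read-prohibited" = r) ↔ (r = "s3-bucket-public-read-prohibited") from eq_comm,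
    show ("s3-bucket-public-write-prohibited" = r) ↔ (r = "s3-bucket-public-write-prohibited") from eq_comm,
    show ("s3-bucket-block-public-acl-enabled" = r) ↔ (r = "s3-bucket-block-public-acl-enabled") from eq_comm,
    show ("s3-bucket-server-side-encryption-enabled" = r) ↔ (r = "s3-bucket-server-side-encryption-enabled") from eq_comm,
    show ("s3-bucket-versioning-enabled" = r) ↔ (r = "s3-bucket-versioning-enabled") from eq_comm,
    show ("s3-bucket-logging-enabled" = r) ↔ (r = "s3-bucket-logging-enabled") from eq_comm,
    show ("s3-bucket-ssl-requests-only" = r) ↔ (r = "s3-bucket-ssl-requests-only") from eq_comm,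
    show ("s3-bucket-object-lock-enabled" = r) ↔ (r = "s3-bucket-object-lock-enabled") from eq_comm,
    show ("s3-bucket-replication-enabled" = r) ↔ (r = "s3-bucket-replication-enabled") from eq_comm]

-- A's per-category count unfolded one event at a time
lemma sevCount_cons (rules : List String) (e : List (String × String)) (es : List (List (String × String))) :
    sevCount rules (e :: es) =
      (if (((PySem.Dict.mk e).get? "configRuleName").getD "" ∈ rules ∧
           ((PySem.Dict.mk e).get? "complianceType").getD "" = "NON_COMPLIANT") then 1 else 0) +
        sevCount rules es := by
  simp [sevCount, List.filter_cons]
  split_ifs <;> simp_all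
  ring

-- fold invariant: running B's loop from arbitrary counter values adds A's four counts
lemma bFold_items (es : List (List (String × String))) :
    ∀ c h m l : Int,
      (es.foldl bStep (PySem.Dict.mk [("critical", c), ("high", h), ("medium", m), ("low", l)])).items =
        [("critical", c + sevCount critical_rules es),
         ("high", h + sevCount high_rules es),
         ("medium", m + sevCount medium_rules es),
         ("low", l + sevCount low_rules es)] := by
  induction es with
  | nil => intro c h m l; simp [sevCount]
  | cons e es ih =>
    intro c h m l
    rw [List.foldl_cons]
    by_cases hc : ((PySem.Dict.mk e).get? "complianceType").getD "" = "NON_COMPLIANT"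
    · rw [show bStep (PySem.Dict.mk [("critical", c), ("high", h), ("medium", m), ("low", l)]) e =
        (match severity_by_rule.get? (((PySem.Dict.mk e).get? "configRuleName").getD "") with
         | some sev => (PySem.Dict.mk [("critical", c), ("high", h), ("medium", m), ("low", l)]).modify sev 0 (· + 1)
         | none => PySem.Dict.mk [("critical", c), ("high", h), ("medium", m), ("low", l)]) from by
          unfold bStep; split <;> simp [hc]]
      rw [sev_get?]
      split_ifs with h1 h2 h3 h4 h5 h6 h7 h8 h9
      all_goals (
        simp only [PySem.Dict.modify, PySem.Dict.contains, PySem.Dict.insert, PySem.Dict.getD,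
          PySem.Dict.get?, List.find?, List.map]
        try simp
        rw [ih]
        simp [sevCount_cons, critical_rules, high_rules, medium_rules, low_rules, *]
        try omega)
    · rw [show bStep (PySem.Dict.mk [("critical", c), ("high", h), ("medium", m), ("low", l)]) e =
        PySem.Dict.mk [("critical", c), ("high", h), ("medium", m), ("low", l)] from by
          unfold bStep; split <;> simp [hc]]
      rw [ih]
      simp [sevCount_cons, hc]

-- ===== VERDICT (by name: the statement is the Claim_ definition above) =====
theorem calculate_severity_counts_spec : Claim_equal_calculate_severity_counts := by
  intro events _ _
  unfold Spec_calculate_severity_counts calculate_severity_counts calculate_severity_counts_alt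
  rw [bFold_items]
  simp
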